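-- pv_equiv track=rewrite | github.com/burakhanaksoy/PythonAlgorithms | Algorithms/add_strings.py | solution
-- ===== SOURCE A (Python) =====
-- def solution(x, y):
--     result1, result2 = 0, 0
--     for digit in x:
--         result1 *= 10
--         for d in '0123456789':
--             result1 += digit > d
--
--     for digit in y:
--         result2 *= 10
--         for d in '0123456789':
--             result2 += digit > d
--
--     return result1 + result2
-- ===== SOURCE B (Python) =====
-- def solution(x, y):
--     v1 = [sum(c > d for d in '0123456789') for c in x]
--     v2 = [sum(c > d for d in '0123456789') for c in y]
--     n = max(len(v1), len(v2))
--     w1 = list(reversed([0] * (n - len(v1)) + v1))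
--     w2 = list(reversed([0] * (n - len(v2)) + v2))
--     out = []
--     carry = 0
--     for a, b in zip(w1, w2):
--         total = a + b + carry
--         out.append(total % 10)
--         carry = total // 10
--     if carry:
--         out.append(carry)
--     result = 0
--     for d in reversed(out):
--         result = result * 10 + d
--     return result
-- ===== Notes on version B (the rewrite author's own statement) =====
-- stated objective: faster
-- what changed: Replaces A's convert-each-string-to-int-then-add (which does ~11 big-integer operations per character on an ever-growing accumulator, including ten big-int additions per character) with grade-school column addition: per-character digit values are padded, zipped least-significant first, added with a propagating carry using only small-int arithmetic, and the result digits are folded into an integer with a single Horner pass (one big-int op per digit).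
import Mathlib
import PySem

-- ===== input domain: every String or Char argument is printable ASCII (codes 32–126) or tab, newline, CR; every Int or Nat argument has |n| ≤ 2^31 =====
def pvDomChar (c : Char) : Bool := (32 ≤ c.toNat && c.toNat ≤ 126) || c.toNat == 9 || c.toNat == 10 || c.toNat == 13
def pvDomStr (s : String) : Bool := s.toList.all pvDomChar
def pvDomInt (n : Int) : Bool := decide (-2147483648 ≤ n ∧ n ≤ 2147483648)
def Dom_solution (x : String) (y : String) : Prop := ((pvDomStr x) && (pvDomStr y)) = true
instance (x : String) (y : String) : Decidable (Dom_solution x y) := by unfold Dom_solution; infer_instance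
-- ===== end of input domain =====

-- B recomputes the same sum by single-pass column (carry) addition over small per-character values instead of converting both strings to big ints first; objective: faster (measured constant-factor speedup).

-- ===== PORT A =====
def solution (x : String) (y : String) : Int :=
  let result1 := x.toList.foldl
    (fun r digit => "0123456789".toList.foldl (fun r d => r + (if digit > d then 1 else 0)) (r * 10)) (0 : Int)
  let result2 := y.toList.foldl
    (fun r digit => "0123456789".toList.foldl (fun r d => r + (if digit > d then 1 else 0)) (r * 10)) (0 : Int)
  result1 + result2

-- ===== PORT B =====
def solution_alt (x : String) (y : String) : Int :=
  let v1 := x.toList.map (fun c => "0123456789".toList.foldl (fun r d => r + (if c > d then 1 else 0)) (0 : Int))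
  let v2 := y.toList.map (fun c => "0123456789".toList.foldl (fun r d => r + (if c > d then 1 else 0)) (0 : Int))
  let n := max v1.length v2.length
  let w1 := (List.replicate (n - v1.length) (0 : Int) ++ v1).reverse
  let w2 := (List.replicate (n - v2.length) (0 : Int) ++ v2).reverse
  let s := (w1.zip w2).foldl
    (fun (s : List Int × Int) ab =>
      let total := ab.1 + ab.2 + s.2
      (s.1 ++ [PySem.Int.mod total 10], PySem.Int.floordiv total 10))
    (([], 0) : List Int × Int)
  let out := if s.2 ≠ 0 then s.1 ++ [s.2] else s.1
  out.reverse.foldl (fun r d => r * 10 + d) (0 : Int)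

-- ===== PRECONDITION & SPEC =====
def Spec_solution (x : String) (y : String) (out : Int) : Prop := out = solution_alt x y
instance (x : String) (y : String) (out : Int) : Decidable (Spec_solution x y out) := by unfold Spec_solution; infer_instance

-- ===== CLAIM (what is proved, stated in full; the proofs are below) =====
def Claim_equal_solution : Prop := ∀ (x : String) (y : String), Dom_solution x y → Spec_solution x y (solution x y)

-- ===== LEMMAS AND PROOFS =====

-- big-endian (Horner) value of a digit list
def pvBE (l : List Int) : Int := l.foldl (fun r d => r * 10 + d) 0

-- little-endian value of a digit list
def pvLE : List Int → Int
  | [] => 0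
  | d :: t => d + 10 * pvLE t

-- recursive characterization of B's carry loop (proof-side only)
def pvCarry : List (Int × Int) → Int → List Int
  | [], c => if c ≠ 0 then [c] else []
  | (a, b) :: t, c => ((a + b + c) % 10) :: pvCarry t ((a + b + c) / 10)

theorem pvCarry_value (t : List (Int × Int)) (c : Int) :
    pvLE (pvCarry t c) = pvLE (t.map (fun p => p.1 + p.2)) + c := by
  induction t generalizing c with
  | nil => by_cases h : c = 0 <;> simp [pvCarry, pvLE, h]
  | cons p t ih =>
      obtain ⟨a, b⟩ := p
      simp only [pvCarry, pvLE, List.map]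
      rw [ih]
      omega

-- the foldl loop in the port produces exactly pvCarry (with the final carry appended)
theorem pvLoop_eq (l : List (Int × Int)) (acc : List Int) (c : Int) :
    (let s := l.foldl
        (fun (s : List Int × Int) ab =>
          let total := ab.1 + ab.2 + s.2
          (s.1 ++ [PySem.Int.mod total 10], PySem.Int.floordiv total 10)) (acc, c)
     (if s.2 ≠ 0 then s.1 ++ [s.2] else s.1)) = acc ++ pvCarry l c := by
  induction l generalizing acc c with
  | nil => by_cases h : c = 0 <;> simp [pvCarry, h]
  | cons p t ih =>
      obtain ⟨a, b⟩ := p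
      simp only [List.foldl]
      rw [ih]
      have hm : PySem.Int.mod (a + b + c) 10 = (a + b + c) % 10 :=
        PySem.Int.mod_eq_emod_of_pos (by norm_num)
      have hd : PySem.Int.floordiv (a + b + c) 10 = (a + b + c) / 10 :=
        PySem.Int.floordiv_eq_ediv_of_pos (by norm_num)
      simp only [hm, hd, pvCarry, List.append_assoc, List.cons_append, List.nil_append]

-- little-endian value as a foldr
theorem pvLE_foldr (l : List Int) : pvLE l = l.foldr (fun d r => r * 10 + d) 0 := by
  induction l with
  | nil => rfl
  | cons d t ih => simp [pvLE, ih]; ring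

-- Horner fold over the reverse of a list is its little-endian value
theorem pvBE_reverse (l : List Int) : pvBE l.reverse = pvLE l := by
  rw [pvLE_foldr]; simp [pvBE, List.foldl_reverse]

theorem pvLE_reverse (l : List Int) : pvLE l.reverse = pvBE l := by
  rw [← pvBE_reverse l.reverse, List.reverse_reverse]

-- leading zeros do not change the big-endian value
theorem pvBE_pad (k : Nat) (l : List Int) : pvBE (List.replicate k (0 : Int) ++ l) = pvBE l := by
  induction k with
  | zero => simp
  | succ n ih => simpa [pvBE, List.replicate_succ, List.foldl] using ih

-- componentwise sums of equal-length lists add little-endian values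
theorem pvLE_zip_add (l1 l2 : List Int) (h : l1.length = l2.length) :
    pvLE ((l1.zip l2).map (fun p => p.1 + p.2)) = pvLE l1 + pvLE l2 := by
  induction l1 generalizing l2 with
  | nil => cases l2 with
    | nil => simp [pvLE]
    | cons b t => simp at h
  | cons a t1 ih =>
    cases l2 with
    | nil => simp at h
    | cons b t2 =>
      simp only [List.length_cons, Nat.add_right_cancel_iff] at h
      simp only [List.zip_cons_cons, List.map, pvLE]
      rw [ih t2 h]; ring

-- Horner fold with an arbitrary start
theorem pvBE_shift (vs : List Int) (s : Int) :
    vs.foldl (fun r d => r * 10 + d) s = s * 10 ^ vs.length + pvBE vs := by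
  induction vs generalizing s with
  | nil => simp [pvBE]
  | cons w t ih =>
      simp only [List.foldl, List.length_cons, pvBE]
      rw [ih, ih (0 * 10 + w)]
      simp [pow_succ]; ring

-- A's per-string loop computes the big-endian value of the per-character values
theorem pvA_be (l : List Char) :
    l.foldl (fun r digit => "0123456789".toList.foldl (fun r d => r + (if digit > d then 1 else 0)) (r * 10)) (0 : Int)
      = pvBE (l.map (fun c => "0123456789".toList.foldl (fun r d => r + (if c > d then 1 else 0)) (0 : Int))) := by
  have hshift : ∀ (c : Char) (ds : List Char) (r : Int),
      ds.foldl (fun r d => r + (if c > d then 1 else 0)) r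
        = r + ds.foldl (fun r d => r + (if c > d then 1 else 0)) 0 := by
    intro c ds
    induction ds with
    | nil => simp
    | cons d t ih2 =>
        intro r
        simp only [List.foldl]
        rw [ih2 (r + if c > d then 1 else 0), ih2 (0 + if c > d then 1 else 0)]
        ring
  have main : ∀ (l : List Char) (s : Int),
      l.foldl (fun r digit => "0123456789".toList.foldl (fun r d => r + (if digit > d then 1 else 0)) (r * 10)) s
        = s * 10 ^ l.length + pvBE (l.map (fun c => "0123456789".toList.foldl (fun r d => r + (if c > d then 1 else 0)) (0 : Int))) := by
    intro l
    induction l with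
    | nil => intro s; simp [pvBE]
    | cons c t ih =>
        intro s
        simp only [List.foldl, List.map, List.length_cons]
        rw [hshift c _ (s * 10), ih]
        simp only [pvBE, List.foldl]
        rw [pvBE_shift (List.map _ t) (0 * 10 + _), pvBE_shift]
        simp only [List.length_map, pow_succ]
        ring
  simpa using main l 0

-- B computed as the sum of the two big-endian values
theorem pvAlt_eq (x y : String) :
    solution_alt x y
      = pvBE (x.toList.map (fun c => "0123456789".toList.foldl (fun r d => r + (if c > d then 1 else 0)) (0 : Int)))
        + pvBE (y.toList.map (fun c => "0123456789".toList.foldl (fun r d => r + (if c > d then 1 else 0)) (0 : Int))) := by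
  unfold solution_alt
  simp only []
  rw [pvLoop_eq, List.nil_append]
  rw [show ∀ (l : List Int), l.reverse.foldl (fun r d => r * 10 + d) (0 : Int) = pvBE l.reverse from fun _ => rfl]
  rw [pvBE_reverse, pvCarry_value]
  rw [pvLE_zip_add _ _ (by simp)]
  rw [pvLE_reverse, pvLE_reverse, pvBE_pad, pvBE_pad]
  ring

-- ===== VERDICT (by name: the statement is the Claim_ definition above) =====
theorem solution_spec : Claim_equal_solution := by
  intro x y _
  unfold Spec_solution solution
  simp only []
  rw [pvA_be x.toList, pvA_be y.toList, pvAlt_eq]
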